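-- pv_equiv track=rewrite | github.com/barbosantos/search-algorithms | problemaAspirador.py | funcaoSucessora
-- ===== SOURCE A (Python) =====
-- def funcaoSucessora(estado, acao):
--
--     lista = [['ELL','Aspirar','ELL'],
--              ['ELL','Esquerda','ELL'],
--              ['ELL','Direita','DLL'],
--
--              ['ELS','Aspirar','ELS'],
--              ['ELS','Esquerda','ELS'],
--              ['ELS','Direita','DLS'],
--
--              ['ESL','Aspirar','ELL'],
--              ['ESL','Esquerda','ESL'],
--              ['ESL','Direita','DSL'],
--
--              ['ESS','Aspirar','ELS'],
--              ['ESS','Esquerda','ESS'],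
--              ['ESS','Direita','DSS'],
--
--              ['DLL','Aspirar','DLL'],
--              ['DLL','Esquerda','ELL'],
--              ['DLL','Direita','DLL'],
--
--              ['DLS','Aspirar','DLL'],
--              ['DLS','Esquerda','ELS'],
--              ['DLS','Direita','DLS'],
--
--              ['DSL','Aspirar','DSL'],
--              ['DSL','Esquerda','ESL'],
--              ['DSL','Direita','DSL'],
--
--              ['DSS','Aspirar','DSL'],
--              ['DSS','Esquerda','ESS'],
--              ['DSS','Direita','DSS']]
--
--     for i in lista:
--         if (estado == i[0] and acao == i[1]):
--             return i[2]
--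
--     return ('Erro na função sucessora!')
-- ===== SOURCE B (Python) =====
-- def funcaoSucessora(estado, acao):
--     # Parse the 3-char state (position, left room, right room) and derive the successor.
--     if len(estado) == 3:
--         p, r1, r2 = estado[0], estado[1], estado[2]
--         if p in ('E', 'D') and r1 in ('L', 'S') and r2 in ('L', 'S'):
--             if acao == 'Esquerda':
--                 return 'E' + r1 + r2
--             if acao == 'Direita':
--                 return 'D' + r1 + r2
--             if acao == 'Aspirar':
--                 return p + 'L' + r2 if p == 'E' else p + r1 + 'L'
--     return 'Erro na função sucessora!'
-- ===== Notes on version B (the rewrite author's own statement) =====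
-- stated objective: simpler
-- what changed: B parses the 3-char state into (position, room1, room2) and computes the successor arithmetically (set position for moves, clean the room at the current position for Aspirar) instead of scanning a 24-row transition table.
import Mathlib
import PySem

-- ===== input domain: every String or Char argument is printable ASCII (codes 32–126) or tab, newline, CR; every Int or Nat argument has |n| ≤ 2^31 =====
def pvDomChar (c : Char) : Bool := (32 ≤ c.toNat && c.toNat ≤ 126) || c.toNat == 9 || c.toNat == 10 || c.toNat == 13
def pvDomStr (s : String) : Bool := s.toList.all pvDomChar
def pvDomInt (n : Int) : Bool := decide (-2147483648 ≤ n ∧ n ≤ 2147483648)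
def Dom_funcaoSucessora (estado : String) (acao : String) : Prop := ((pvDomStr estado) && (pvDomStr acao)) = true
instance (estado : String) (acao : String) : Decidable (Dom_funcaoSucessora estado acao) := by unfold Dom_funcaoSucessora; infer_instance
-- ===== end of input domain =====

-- B replaces A's 24-row transition-table scan by parsing the state and computing the successor directly (objective: simpler).

-- ===== PORT A =====
-- the transition table, as in A
def pvTabela : List (String × String × String) :=
  [("ELL","Aspirar","ELL"), ("ELL","Esquerda","ELL"), ("ELL","Direita","DLL"),
   ("ELS","Aspirar","ELS"), ("ELS","Esquerda","ELS"), ("ELS","Direita","DLS"),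
   ("ESL","Aspirar","ELL"), ("ESL","Esquerda","ESL"), ("ESL","Direita","DSL"),
   ("ESS","Aspirar","ELS"), ("ESS","Esquerda","ESS"), ("ESS","Direita","DSS"),
   ("DLL","Aspirar","DLL"), ("DLL","Esquerda","ELL"), ("DLL","Direita","DLL"),
   ("DLS","Aspirar","DLL"), ("DLS","Esquerda","ELS"), ("DLS","Direita","DLS"),
   ("DSL","Aspirar","DSL"), ("DSL","Esquerda","ESL"), ("DSL","Direita","DSL"),
   ("DSS","Aspirar","DSL"), ("DSS","Esquerda","ESS"), ("DSS","Direita","DSS")]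

-- the 'for i in lista: if … return i[2]' loop
def pvLoopA (estado acao : String) : List (String × String × String) → String
  | [] => "Erro na função sucessora!"
  | (s, a, r) :: rest => if estado = s ∧ acao = a then r else pvLoopA estado acao rest

def funcaoSucessora (estado : String) (acao : String) : String :=
  pvLoopA estado acao pvTabela

-- ===== PORT B =====
def funcaoSucessora_alt (estado : String) (acao : String) : String :=
  match estado.toList with
  | [p, r1, r2] =>
    if (p = 'E' ∨ p = 'D') ∧ (r1 = 'L' ∨ r1 = 'S') ∧ (r2 = 'L' ∨ r2 = 'S') then
      if acao = "Esquerda" then String.ofList ['E', r1, r2]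
      else if acao = "Direita" then String.ofList ['D', r1, r2]
      else if acao = "Aspirar" then
        if p = 'E' then String.ofList [p, 'L', r2] else String.ofList [p, r1, 'L']
      else "Erro na função sucessora!"
    else "Erro na função sucessora!"
  | _ => "Erro na função sucessora!"

-- ===== PRECONDITION & SPEC =====
def Spec_funcaoSucessora (estado : String) (acao : String) (out : String) : Prop := out = funcaoSucessora_alt estado acao
instance (estado : String) (acao : String) (out : String) : Decidable (Spec_funcaoSucessora estado acao out) := by unfold Spec_funcaoSucessora; infer_instance

-- ===== CLAIM (what is proved, stated in full; the proofs are below) =====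
def Claim_equal_funcaoSucessora : Prop := ∀ (estado : String) (acao : String), Dom_funcaoSucessora estado acao → Spec_funcaoSucessora estado acao (funcaoSucessora estado acao)

-- ===== LEMMAS AND PROOFS =====

-- if estado is none of the 8 legal states, B returns the error string
lemma alt_error_of_invalid (estado acao : String)
    (h1 : estado ≠ "ELL") (h2 : estado ≠ "ELS") (h3 : estado ≠ "ESL") (h4 : estado ≠ "ESS")
    (h5 : estado ≠ "DLL") (h6 : estado ≠ "DLS") (h7 : estado ≠ "DSL") (h8 : estado ≠ "DSS") :
    funcaoSucessora_alt estado acao = "Erro na função sucessora!" := by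
  unfold funcaoSucessora_alt
  cases hm : estado.toList with
  | nil => rfl
  | cons p t =>
    cases t with
    | nil => rfl
    | cons r1 t2 =>
      cases t2 with
      | nil => rfl
      | cons r2 t3 =>
        cases t3 with
        | cons _ _ => rfl
        | nil =>
          have he : estado = String.ofList [p, r1, r2] := by
            rw [← hm]; exact String.ofList_toList.symm
          subst he
          simp only []
          split
          · rename_i hv
            obtain ⟨hp | hp, hr1 | hr1, hr2 | hr2⟩ := hv <;> subst hp <;> subst hr1 <;> subst hr2 <;>
              first
              | exact absurd rfl h1 | exact absurd rfl h2 | exact absurd rfl h3 | exact absurd rfl h4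
              | exact absurd rfl h5 | exact absurd rfl h6 | exact absurd rfl h7 | exact absurd rfl h8
          · rfl

-- ===== VERDICT (by name: the statement is the Claim_ definition above) =====
theorem funcaoSucessora_spec : Claim_equal_funcaoSucessora := by
  intro estado acao _
  unfold Spec_funcaoSucessora
  by_cases h1 : estado = "ELL"
  case pos => subst h1; by_cases ha : acao = "Aspirar"
              · subst ha; decide
              · by_cases hb : acao = "Esquerda"
                · subst hb; decide
                · by_cases hc : acao = "Direita"
                  · subst hc; decide
                  · simp [funcaoSucessora, pvLoopA, pvTabela, funcaoSucessora_alt, ha, hb, hc]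
  by_cases h2 : estado = "ELS"
  case pos => subst h2; by_cases ha : acao = "Aspirar"
              · subst ha; decide
              · by_cases hb : acao = "Esquerda"
                · subst hb; decide
                · by_cases hc : acao = "Direita"
                  · subst hc; decide
                  · simp [funcaoSucessora, pvLoopA, pvTabela, funcaoSucessora_alt, ha, hb, hc]
  by_cases h3 : estado = "ESL"
  case pos => subst h3; by_cases ha : acao = "Aspirar"
              · subst ha; decide
              · by_cases hb : acao = "Esquerda"
                · subst hb; decide
                · by_cases hc : acao = "Direita"
                  · subst hc; decide
                  · simp [funcaoSucessora, pvLoopA, pvTabela, funcaoSucessora_alt, ha, hb, hc]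
  by_cases h4 : estado = "ESS"
  case pos => subst h4; by_cases ha : acao = "Aspirar"
              · subst ha; decide
              · by_cases hb : acao = "Esquerda"
                · subst hb; decide
                · by_cases hc : acao = "Direita"
                  · subst hc; decide
                  · simp [funcaoSucessora, pvLoopA, pvTabela, funcaoSucessora_alt, ha, hb, hc]
  by_cases h5 : estado = "DLL"
  case pos => subst h5; by_cases ha : acao = "Aspirar"
              · subst ha; decide
              · by_cases hb : acao = "Esquerda"
                · subst hb; decide
                · by_cases hc : acao = "Direita"
                  · subst hc; decide
                  · simp [funcaoSucessora, pvLoopA, pvTabela, funcaoSucessora_alt, ha, hb, hc]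
  by_cases h6 : estado = "DLS"
  case pos => subst h6; by_cases ha : acao = "Aspirar"
              · subst ha; decide
              · by_cases hb : acao = "Esquerda"
                · subst hb; decide
                · by_cases hc : acao = "Direita"
                  · subst hc; decide
                  · simp [funcaoSucessora, pvLoopA, pvTabela, funcaoSucessora_alt, ha, hb, hc]
  by_cases h7 : estado = "DSL"
  case pos => subst h7; by_cases ha : acao = "Aspirar"
              · subst ha; decide
              · by_cases hb : acao = "Esquerda"
                · subst hb; decide
                · by_cases hc : acao = "Direita"
                  · subst hc; decide
                  · simp [funcaoSucessora, pvLoopA, pvTabela, funcaoSucessora_alt, ha, hb, hc]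
  by_cases h8 : estado = "DSS"
  case pos => subst h8; by_cases ha : acao = "Aspirar"
              · subst ha; decide
              · by_cases hb : acao = "Esquerda"
                · subst hb; decide
                · by_cases hc : acao = "Direita"
                  · subst hc; decide
                  · simp [funcaoSucessora, pvLoopA, pvTabela, funcaoSucessora_alt, ha, hb, hc]
  rw [alt_error_of_invalid estado acao h1 h2 h3 h4 h5 h6 h7 h8]
  simp [funcaoSucessora, pvLoopA, pvTabela, h1, h2, h3, h4, h5, h6, h7, h8]
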